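-- pv_equiv track=rewrite | github.com/Rudeigin/stokh | func.py | find_ni_int
-- ===== SOURCE A (Python) =====
-- def find_ni_int(v, vint):
-- 	ni = []
-- 	for i in range(1, len(vint)):
-- 		ni.append(0)
-- 		for j in range(len(v)):
-- 			if vint[i-1] < v[j] <= vint[i]:
-- 				ni[i-1] += 1
-- 	return ni
-- ===== SOURCE B (Python) =====
-- def find_ni_int(v, vint):
--     s = sorted(v)
--
--     def rank(t):  # number of elements of s that are <= t
--         lo, hi = 0, len(s)
--         while lo < hi:
--             mid = (lo + hi) // 2
--             if s[mid] <= t: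
--                 lo = mid + 1
--             else:
--                 hi = mid
--         return lo
--
--     r = [rank(t) for t in vint]
--     return [max(0, r[i] - r[i - 1]) for i in range(1, len(vint))]
-- ===== Notes on version B (the rewrite author's own statement) =====
-- stated objective: faster
-- what changed: Instead of rescanning all of v for every consecutive vint pair, B sorts v once, computes each boundary's rank (count of elements <= t) by binary search, and returns clamped rank differences.
import Mathlib
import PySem

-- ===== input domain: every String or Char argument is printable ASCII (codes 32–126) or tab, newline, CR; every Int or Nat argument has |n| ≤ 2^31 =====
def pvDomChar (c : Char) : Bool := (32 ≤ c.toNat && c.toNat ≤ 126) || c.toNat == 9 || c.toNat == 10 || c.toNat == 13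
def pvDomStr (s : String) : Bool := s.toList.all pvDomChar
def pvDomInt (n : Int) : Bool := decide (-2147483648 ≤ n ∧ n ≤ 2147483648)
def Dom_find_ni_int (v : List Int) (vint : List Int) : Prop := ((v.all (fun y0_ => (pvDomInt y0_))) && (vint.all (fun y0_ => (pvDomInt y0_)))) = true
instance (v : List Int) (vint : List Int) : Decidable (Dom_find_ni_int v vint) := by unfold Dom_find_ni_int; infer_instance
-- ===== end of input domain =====

-- B replaces A's per-interval scan of v by sorting v once and binary-searching each
-- boundary rank, taking counts as clamped rank differences (objective: faster).

-- ===== PORT A =====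
def find_ni_int (v : List Int) (vint : List Int) : List Int :=
  (PySem.List.pyRange 1 vint.length 1).foldl (fun ni i =>
    let ni := ni ++ [(0 : Int)]
    (PySem.List.pyRange 0 v.length 1).foldl (fun ni j =>
      if PySem.List.pyGetD vint (i - 1) 0 < PySem.List.pyGetD v j 0 ∧
         PySem.List.pyGetD v j 0 ≤ PySem.List.pyGetD vint i 0 then
        ni.set (i - 1).toNat (PySem.List.pyGetD ni (i - 1) 0 + 1)
      else ni) ni) []

-- ===== PORT B =====
-- hand-written bisect loop of Source B ('while lo < hi: …'); the extra fuel argument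
-- (hi - lo bounds the iteration count) only makes the loop structurally recursive
def pvRankGo (s : List Int) (t : Int) : Nat → Nat → Nat → Nat
  | 0, lo, _ => lo
  | fuel + 1, lo, hi =>
    if lo < hi then
      let mid := (lo + hi) / 2
      if PySem.List.pyGetD s (mid : Int) 0 ≤ t then pvRankGo s t fuel (mid + 1) hi
      else pvRankGo s t fuel lo mid
    else lo

def pvRank (s : List Int) (t : Int) (lo hi : Nat) : Nat := pvRankGo s t (hi - lo) lo hi

def find_ni_int_alt (v : List Int) (vint : List Int) : List Int :=
  let s := PySem.List.sorted v (fun x => x) false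
  let r : List Int := vint.map (fun t => (pvRank s t 0 s.length : Int))
  (PySem.List.pyRange 1 vint.length 1).map (fun i =>
    max 0 (PySem.List.pyGetD r i 0 - PySem.List.pyGetD r (i - 1) 0))

-- ===== PRECONDITION & SPEC =====
def Spec_find_ni_int (v : List Int) (vint : List Int) (out : List Int) : Prop := out = find_ni_int_alt v vint
instance (v : List Int) (vint : List Int) (out : List Int) : Decidable (Spec_find_ni_int v vint out) := by unfold Spec_find_ni_int; infer_instance

-- ===== CLAIM (what is proved, stated in full; the proofs are below) =====
def Claim_equal_find_ni_int : Prop := ∀ (v : List Int) (vint : List Int), Dom_find_ni_int v vint → Spec_find_ni_int v vint (find_ni_int v vint)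

-- ===== LEMMAS AND PROOFS =====

-- counting lemma used at the end of the binary search
lemma countP_eq_of_split (s : List Int) (t : Int) (lo : Nat) (hlen : lo ≤ s.length)
    (hlo : ∀ k, (hk : k < lo) → s[k]'(by omega) ≤ t)
    (hhi : ∀ k, (hk : k < s.length) → lo ≤ k → t < s[k]) :
    s.countP (fun x => decide (x ≤ t)) = lo := by
  conv_lhs => rw [← List.take_append_drop lo s]
  rw [List.countP_append]
  have h1 : (s.take lo).countP (fun x => decide (x ≤ t)) = (s.take lo).length := by
    apply List.countP_eq_length.2
    intro a ha
    obtain ⟨i, hi, rfl⟩ := List.getElem_of_mem ha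
    have hil : i < lo := by simp at hi; omega
    simp only [List.getElem_take]
    simpa using hlo i hil
  have h2 : (s.drop lo).countP (fun x => decide (x ≤ t)) = 0 := by
    apply List.countP_eq_zero.2
    intro a ha
    obtain ⟨i, hi, rfl⟩ := List.getElem_of_mem ha
    have hil : lo + i < s.length := by simp at hi; omega
    simp only [List.getElem_drop]
    have := hhi (lo + i) hil (by omega)
    simpa using by omega
  rw [h1, h2, List.length_take]
  omega

-- the bisect loop computes the rank (number of elements ≤ t) on a sorted list
lemma pvRankGo_eq (s : List Int) (t : Int) (hs : s.Pairwise (· ≤ ·)) :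
    ∀ (d lo hi : Nat) (_hd : hi - lo ≤ d) (h1 : lo ≤ hi) (h2 : hi ≤ s.length),
    (∀ k, (hk : k < lo) → s[k]'(by omega) ≤ t) →
    (∀ k, (hk : k < s.length) → hi ≤ k → t < s[k]) →
    pvRankGo s t d lo hi = s.countP (fun x => decide (x ≤ t)) := by
  intro d
  induction d with
  | zero =>
    intro lo hi _ h1 h2 hlo hhi
    show lo = _
    exact (countP_eq_of_split s t lo (by omega) hlo (fun k hk hlk => hhi k hk (by omega))).symm
  | succ d ih =>
    intro lo hi hd h1 h2 hlo hhi
    by_cases h : lo < hi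
    · rw [pvRankGo, if_pos h]
      have hmid1 : (lo + hi) / 2 < hi := by omega
      have hmid2 : lo ≤ (lo + hi) / 2 := by omega
      have hml : (lo + hi) / 2 < s.length := by omega
      have hget : PySem.List.pyGetD s (((lo + hi) / 2 : Nat) : Int) 0 = s[(lo + hi) / 2] := by
        rw [PySem.List.pyGetD_natCast, List.getD_eq_getElem]
      have hpw := List.pairwise_iff_getElem.1 hs
      by_cases hc : s[(lo + hi) / 2] ≤ t
      · rw [if_pos (by rw [hget]; exact hc)]
        apply ih ((lo + hi) / 2 + 1) hi (by omega) (by omega) h2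
        · intro k hk
          rcases Nat.lt_or_ge k ((lo + hi) / 2) with hlt | hge
          · exact le_trans (hpw k ((lo + hi) / 2) (by omega) hml hlt) hc
          · have : k = (lo + hi) / 2 := by omega
            subst this; exact hc
        · exact hhi
      · rw [if_neg (by rw [hget]; exact hc)]
        apply ih lo ((lo + hi) / 2) (by omega) (by omega) (by omega) hlo
        intro k hk hmk
        rcases Nat.lt_or_ge ((lo + hi) / 2) k with hlt | hge
        · have := hpw ((lo + hi) / 2) k hml hk hlt
          omega
        · have : k = (lo + hi) / 2 := by omega
          subst this; omega
    · rw [pvRankGo, if_neg h]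
      have hlh : lo = hi := by omega
      subst hlh
      exact (countP_eq_of_split s t lo (by omega) hlo (fun k hk hlk => hhi k hk (by omega))).symm

-- inner loop of A: increment slot k once per element of v in the interval
lemma inner_loop_eq (P : Int → Prop) [DecidablePred P] :
    ∀ (l : List Int) (acc : List Int) (k : Nat), k < acc.length →
    l.foldl (fun a x => if P x then a.set k (PySem.List.pyGetD a (k : Int) 0 + 1) else a) acc
      = acc.set k (PySem.List.pyGetD acc (k : Int) 0 + (l.countP (fun x => decide (P x)) : Int)) := by
  intro l
  induction l with
  | nil =>
    intro acc k hk
    simp only [List.foldl_nil, List.countP_nil, Int.natCast_zero, add_zero,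
      PySem.List.pyGetD_natCast, List.getD_eq_getElem _ _ hk, List.set_getElem_self]
  | cons x l ih =>
    intro acc k hk
    simp only [List.foldl_cons, List.countP_cons]
    by_cases hp : P x
    · rw [if_pos hp, ih (acc.set k (PySem.List.pyGetD acc (k : Int) 0 + 1)) k (by simpa using hk)]
      rw [List.set_set]
      have : PySem.List.pyGetD (acc.set k (PySem.List.pyGetD acc (k : Int) 0 + 1)) (k : Int) 0
          = PySem.List.pyGetD acc (k : Int) 0 + 1 := by
        rw [PySem.List.pyGetD_natCast, PySem.List.pyGetD_natCast,
          List.getD_eq_getElem _ _ (by simpa using hk), List.getElem_set_self]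
      rw [this]
      have hpx : (decide (P x) = true) := by simpa using hp
      simp only [hpx, if_pos]
      push_cast
      ring_nf
    · rw [if_neg hp, ih acc k hk]
      have hpx : ¬ (decide (P x) = true) := by simpa using hp
      simp only [hpx]
      push_cast
      ring_nf

-- pointwise: interval count = clamped difference of ranks
lemma count_interval_eq (v : List Int) (a b : Int) :
    ((v.countP (fun x => decide (a < x ∧ x ≤ b)) : Int))
      = max 0 ((v.countP (fun x => decide (x ≤ b)) : Int) - (v.countP (fun x => decide (x ≤ a)) : Int)) := by
  rcases lt_or_ge b a with hba | hab
  · have h0 : v.countP (fun x => decide (a < x ∧ x ≤ b)) = 0 := by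
      apply List.countP_eq_zero.2
      intro x hx
      simpa using by omega
    have hle : v.countP (fun x => decide (x ≤ b)) ≤ v.countP (fun x => decide (x ≤ a)) := by
      apply List.countP_mono_left
      intro x hx h
      simpa using by simp at h; omega
    rw [h0, max_eq_left (by omega)]
    simp
  · have key : ∀ w : List Int, w.countP (fun x => decide (a < x ∧ x ≤ b)) + w.countP (fun x => decide (x ≤ a)) = w.countP (fun x => decide (x ≤ b)) := by
      intro w
      induction w with
      | nil => simp
      | cons x w ihw =>
        simp only [List.countP_cons]
        have : (if decide (a < x ∧ x ≤ b) = true then 1 else 0) + (if decide (x ≤ a) = true then 1 else 0) = (if decide (x ≤ b) = true then 1 else 0) := by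
          by_cases h1 : a < x <;> by_cases h2 : x ≤ b <;> simp [h1, h2] <;> omega
        omega
    have := key v
    rw [max_eq_right (by omega)]
    omega

lemma set_append_last (m : List Int) (y c : Int) : (m ++ [y]).set m.length c = m ++ [c] := by
  induction m with
  | nil => simp
  | cons x m ih => simp [ih]

-- characterisation of A: the nested loops produce the per-interval counts
lemma A_char (v vint : List Int) :
    find_ni_int v vint = (PySem.List.pyRange 1 (vint.length : Int) 1).map
      (fun i => (v.countP (fun x => decide (PySem.List.pyGetD vint (i - 1) 0 < x ∧ x ≤ PySem.List.pyGetD vint i 0)) : Int)) := by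
  have main : ∀ n : Nat,
      (PySem.List.pyRange 1 (n : Int) 1).foldl (fun ni i =>
        (PySem.List.pyRange 0 (v.length : Int) 1).foldl (fun ni j =>
          if PySem.List.pyGetD vint (i - 1) 0 < PySem.List.pyGetD v j 0 ∧
             PySem.List.pyGetD v j 0 ≤ PySem.List.pyGetD vint i 0 then
            ni.set (i - 1).toNat (PySem.List.pyGetD ni (i - 1) 0 + 1)
          else ni) (ni ++ [(0 : Int)])) []
      = (PySem.List.pyRange 1 (n : Int) 1).map
        (fun i => (v.countP (fun x => decide (PySem.List.pyGetD vint (i - 1) 0 < x ∧ x ≤ PySem.List.pyGetD vint i 0)) : Int)) := by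
    intro n
    induction n with
    | zero =>
      have h0 : PySem.List.pyRange 1 ((0 : Nat) : Int) 1 = [] := PySem.List.pyRange_one_eq_nil (by simp)
      rw [h0]; rfl
    | succ n ih =>
      rcases Nat.eq_zero_or_pos n with hn0 | hn1
      · subst hn0
        have h1 : PySem.List.pyRange 1 ((1 : Nat) : Int) 1 = [] := PySem.List.pyRange_one_eq_nil (by simp)
        rw [h1]; rfl
      · have hcast : ((n + 1 : Nat) : Int) = (n : Int) + 1 := by push_cast; ring
        rw [hcast, PySem.List.pyRange_one_succ_right (by exact_mod_cast hn1),
          List.foldl_append, List.map_append, ih, List.foldl_cons, List.foldl_nil]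
        -- the single step at i = n
        have hidx : ((n : Int) - 1) = ((n - 1 : Nat) : Int) := by omega
        simp only [hidx, Int.toNat_natCast]
        set m := (PySem.List.pyRange 1 (n : Int) 1).map
          (fun i => (v.countP (fun x => decide (PySem.List.pyGetD vint (i - 1) 0 < x ∧ x ≤ PySem.List.pyGetD vint i 0)) : Int)) with hm
        have hml : m.length = n - 1 := by
          rw [hm, List.length_map, PySem.List.length_pyRange_one]; omega
        rw [PySem.List.foldl_pyRange_zero_pyGetD' v 0
          (fun ni x =>
            if PySem.List.pyGetD vint ((n - 1 : Nat) : Int) 0 < x ∧ x ≤ PySem.List.pyGetD vint (n : Int) 0 then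
              ni.set (n - 1) (PySem.List.pyGetD ni ((n - 1 : Nat) : Int) 0 + 1)
            else ni) (m ++ [(0 : Int)])]
        rw [inner_loop_eq
          (fun x => PySem.List.pyGetD vint ((n - 1 : Nat) : Int) 0 < x ∧ x ≤ PySem.List.pyGetD vint (n : Int) 0)
          v (m ++ [(0 : Int)]) (n - 1) (by simp only [List.length_append, hml, List.length_cons, List.length_nil]; omega)]
        have hz : PySem.List.pyGetD (m ++ [(0 : Int)]) ((n - 1 : Nat) : Int) 0 = 0 := by
          rw [PySem.List.pyGetD_natCast]
          simp only [← hml]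
          rw [List.getD_eq_getElem _ _ (by simp)]
          simp
        rw [hz, zero_add]
        have hlast : n - 1 = m.length := by omega
        rw [hlast, set_append_last]
        simp only [List.map_cons, List.map_nil, hml, hidx]
  simp only [find_ni_int]
  exact main vint.length

-- ===== VERDICT (by name: the statement is the Claim_ definition above) =====
theorem find_ni_int_spec : Claim_equal_find_ni_int := by
  intro v vint _
  unfold Spec_find_ni_int
  rw [A_char]
  simp only [find_ni_int_alt]
  apply List.map_congr_left
  intro i hi
  obtain ⟨hi1, hi2⟩ := PySem.List.mem_pyRange_one.1 hi
  have hs : (PySem.List.sorted v (fun x => x) false).Pairwise (· ≤ ·) :=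
    PySem.List.sorted_pairwise v (fun x => x)
  have hrank : ∀ t : Int,
      ((pvRank (PySem.List.sorted v (fun x => x) false) t 0 (PySem.List.sorted v (fun x => x) false).length : Nat) : Int)
        = ((v.countP (fun x => decide (x ≤ t)) : Nat) : Int) := by
    intro t
    rw [pvRank, pvRankGo_eq (PySem.List.sorted v (fun x => x) false) t hs
      ((PySem.List.sorted v (fun x => x) false).length - 0) 0
      (PySem.List.sorted v (fun x => x) false).length (by omega) (by omega) (le_refl _)
      (fun k hk => by omega) (fun k hk hlk => by omega)]
    rw [(PySem.List.sorted_perm v (fun x => x) false).countP_eq]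
  -- index arithmetic: i and i-1 are in range of vint (and of the mapped rank list)
  have hrl : (vint.map (fun t => ((pvRank (PySem.List.sorted v (fun x => x) false) t 0
      (PySem.List.sorted v (fun x => x) false).length : Nat) : Int))).length = vint.length := by
    simp
  have hgi : PySem.List.pyGetD (vint.map (fun t => ((pvRank (PySem.List.sorted v (fun x => x) false) t 0
      (PySem.List.sorted v (fun x => x) false).length : Nat) : Int))) i 0
      = ((v.countP (fun x => decide (x ≤ vint[i.toNat]'(by omega))) : Nat) : Int) := by
    rw [PySem.List.pyGetD_eq_getElem _ _ (by omega) (by simpa [hrl] using hi2)]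
    rw [List.getElem_map]
    exact hrank _
  have hgi1 : PySem.List.pyGetD (vint.map (fun t => ((pvRank (PySem.List.sorted v (fun x => x) false) t 0
      (PySem.List.sorted v (fun x => x) false).length : Nat) : Int))) (i - 1) 0
      = ((v.countP (fun x => decide (x ≤ vint[(i - 1).toNat]'(by omega))) : Nat) : Int) := by
    rw [PySem.List.pyGetD_eq_getElem _ _ (by omega) (by simp only [hrl]; omega)]
    rw [List.getElem_map]
    exact hrank _
  have hvi : PySem.List.pyGetD vint i 0 = vint[i.toNat]'(by omega) :=
    PySem.List.pyGetD_eq_getElem _ _ (by omega) hi2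
  have hvi1 : PySem.List.pyGetD vint (i - 1) 0 = vint[(i - 1).toNat]'(by omega) :=
    PySem.List.pyGetD_eq_getElem _ _ (by omega) (by omega)
  rw [hgi, hgi1, hvi, hvi1]
  exact count_interval_eq v _ _
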